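-- pv_equiv track=rewrite | github.com/chojs23/problemSolving | 프로그래머스/pccp#1/1.py | solution
-- ===== SOURCE A (Python) =====
-- def solution(input_string):
--     answer = set()
--     last = ""
--     seen = set()
--
--     for input in input_string:
--         if not last:
--             last = input
--             seen.add(input)
--             continue
--         if last == input:
--             continue
--
--         if input not in seen:
--             last = input
--             seen.add(input)
--             continue
--         else:
--             answer.add(input)
--             last = input
--     if not answer:
--         return "N"
--
--     return "".join(sorted(answer))
-- ===== SOURCE B (Python) =====
-- def solution(input_string):
--     # Collapse the string into its run keys (one char per maximal block of equal
--     # consecutive chars), tally them, and keep chars heading at least two runs.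
--     runs = []
--     for ch in input_string:
--         if not runs or runs[-1] != ch:
--             runs.append(ch)
--     counts = {}
--     for ch in runs:
--         counts[ch] = counts.get(ch, 0) + 1
--     chars = sorted(ch for ch, n in counts.items() if n >= 2)
--     if not chars:
--         return "N"
--     return "".join(chars)
-- ===== Notes on version B (the rewrite author's own statement) =====
-- stated objective: simpler
-- what changed: Replaces A's single stateful scan (tracking last char, a seen-set and an answer-set with four branches) by a declarative pipeline: collapse the string into run keys, count them in a dict, keep the chars with run-count >= 2, sort.
import Mathlib
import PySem

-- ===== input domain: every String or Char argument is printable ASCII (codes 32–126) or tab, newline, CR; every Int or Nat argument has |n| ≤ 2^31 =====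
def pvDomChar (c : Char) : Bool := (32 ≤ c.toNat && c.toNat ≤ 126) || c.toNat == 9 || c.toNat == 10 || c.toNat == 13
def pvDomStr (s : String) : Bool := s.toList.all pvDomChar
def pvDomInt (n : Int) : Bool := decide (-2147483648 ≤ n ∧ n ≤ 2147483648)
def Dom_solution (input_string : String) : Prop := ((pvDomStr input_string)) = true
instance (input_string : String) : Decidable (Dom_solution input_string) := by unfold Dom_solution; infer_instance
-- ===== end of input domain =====

-- B restates A's stateful scan as a pipeline: collapse to run keys, count, filter (≥ 2), sort.

-- ===== PORT A =====
-- one loop iteration of A over state (answer, last, seen); last = "" is modelled as none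
def solutionStep (st : PySem.Set Char × Option Char × PySem.Set Char) (input : Char) :
    PySem.Set Char × Option Char × PySem.Set Char :=
  match st with
  | (answer, last, seen) =>
    match last with
    | none => (answer, some input, PySem.Set.add seen input)
    | some l =>
      if l = input then (answer, some l, seen)
      else if input ∉ seen then (answer, some input, PySem.Set.add seen input)
      else (PySem.Set.add answer input, some input, seen)

def solution (input_string : String) : String :=
  let st := input_string.toList.foldl solutionStep (PySem.Set.empty, none, PySem.Set.empty)
  if st.1 = [] then "N"
  -- "".join(sorted(answer)) : String.ofList of the sorted char list
  else String.ofList (PySem.List.sorted st.1 (fun x => x) false)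

-- ===== PORT B =====
-- 'if not runs or runs[-1] != ch: runs.append(ch)'
def runStep (runs : List Char) (ch : Char) : List Char :=
  if runs = [] ∨ runs.getLast? ≠ some ch then runs ++ [ch] else runs

def solution_alt (input_string : String) : String :=
  let runs := input_string.toList.foldl runStep []
  let counts := runs.foldl (fun d ch => d.insert ch (d.getD ch 0 + 1))
    (PySem.Dict.empty : PySem.Dict Char Int)
  let chars := PySem.List.sorted ((counts.items.filter (fun p => 2 ≤ p.2)).map (·.1))
    (fun x => x) false
  if chars = [] then "N" else String.ofList chars

-- ===== PRECONDITION & SPEC =====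
def Spec_solution (input_string : String) (out : String) : Prop := out = solution_alt input_string
instance (input_string : String) (out : String) : Decidable (Spec_solution input_string out) := by unfold Spec_solution; infer_instance

-- ===== CLAIM (what is proved, stated in full; the proofs are below) =====
def Claim_equal_solution : Prop := ∀ (input_string : String), Dom_solution input_string → Spec_solution input_string (solution input_string)

-- ===== LEMMAS AND PROOFS =====

-- the invariant tying A's scan state to B's run list, for the prefix processed so far
def ScanInv (l : List Char) : Prop :=
  let st := l.foldl solutionStep (PySem.Set.empty, none, PySem.Set.empty)
  let runs := l.foldl runStep []
  st.2.1 = l.getLast? ∧ runs.getLast? = l.getLast? ∧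
  st.2.2 = PySem.Set.ofList runs ∧
  st.1.Nodup ∧ (∀ x, x ∈ st.1 ↔ 2 ≤ runs.count x)

theorem inv_holds (l : List Char) : ScanInv l := by
  induction l using List.reverseRecOn with
  | nil =>
    refine ⟨rfl, rfl, rfl, List.nodup_nil, ?_⟩
    intro x; simp [PySem.Set.empty]
  | append_singleton l x ih =>
    obtain ⟨h1, h2, h3, h4, h5⟩ := ih
    simp only [ScanInv, List.foldl_append, List.foldl_cons, List.foldl_nil] at *
    set st := l.foldl solutionStep (PySem.Set.empty, none, PySem.Set.empty) with hst
    set runs := l.foldl runStep [] with hruns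
    rcases hlast : l.getLast? with _ | c
    · -- l = [], first character: a fresh run starts, seen = {x}
      have hl : l = [] := List.getLast?_eq_none_iff.mp hlast
      subst hl
      have hstep : solutionStep st x = (PySem.Set.empty, some x, [x]) := by
        simp [hst, solutionStep, PySem.Set.empty, PySem.Set.add, PySem.Set.contains]
      have hrstep : runStep runs x = [x] := by simp [hruns, runStep]
      rw [hstep, hrstep]
      refine ⟨rfl, rfl, by simp [PySem.Set.ofList, PySem.Set.add, PySem.Set.empty,
        PySem.Set.contains], List.nodup_nil, ?_⟩
      intro y; simp [PySem.Set.empty]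
      exact le_trans List.count_le_length (by simp)
    · have hrne : runs ≠ [] := by
        intro h; rw [h] at h2; simp [hlast] at h2
      by_cases hcx : c = x
      · -- same char again: the run continues, nothing changes
        rw [hcx] at hlast
        have hstep : solutionStep st x = st := by
          obtain ⟨a, la, se⟩ := st
          simp only at h1
          rw [hlast] at h1; subst h1
          simp [solutionStep]
        have hrstep : runStep runs x = runs := by
          rw [runStep, if_neg]
          push Not
          exact ⟨hrne, by rw [h2, hlast]⟩
        rw [hstep, hrstep]
        exact ⟨by rw [h1, hlast, List.getLast?_concat],
               by rw [h2, hlast, List.getLast?_concat], h3, h4, h5⟩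
      · -- a new run headed by x starts
        have hrstep : runStep runs x = runs ++ [x] := by
          rw [runStep, if_pos]
          right; rw [h2, hlast]
          exact fun h => hcx (Option.some.inj h)
        have hstepEq : solutionStep st x =
            if x ∈ st.2.2 then (PySem.Set.add st.1 x, some x, st.2.2)
            else (st.1, some x, PySem.Set.add st.2.2 x) := by
          obtain ⟨a, la, se⟩ := st
          simp only at h1 ⊢
          rw [hlast] at h1; subst h1
          rcases Decidable.em (x ∈ se) with hm | hm <;> simp [solutionStep, hcx, hm]
        rw [hrstep, hstepEq]
        by_cases hmem : x ∈ runs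
        · -- x already headed a run: it is added to answer
          have hx : x ∈ st.2.2 := by rw [h3]; exact (PySem.Set.mem_ofList runs x).mpr hmem
          rw [if_pos hx]
          refine ⟨by rw [List.getLast?_concat], by rw [List.getLast?_concat, List.getLast?_concat],
            ?_, PySem.Set.nodup_add st.1 x h4, ?_⟩
          · rw [PySem.Set.ofList_append_singleton,
              PySem.Set.add_of_mem ((PySem.Set.mem_ofList runs x).mpr hmem), h3]
          · intro y
            rw [PySem.Set.mem_add, List.count_append]
            by_cases hyx : y = x
            · subst hyx
              have : 1 ≤ List.count y runs := List.one_le_count_iff.mpr hmem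
              simp
              omega
            · rw [h5]
              have : List.count y [x] = 0 := by
                simp [List.count_eq_zero]; exact hyx
              simp [this, hyx]
        · -- x heads its first run: only seen grows
          have hx : x ∉ st.2.2 := by rw [h3]; simpa [PySem.Set.mem_ofList runs x] using hmem
          rw [if_neg hx]
          refine ⟨by rw [List.getLast?_concat], by rw [List.getLast?_concat, List.getLast?_concat],
            by rw [PySem.Set.ofList_append_singleton, h3], h4, ?_⟩
          intro y
          rw [List.count_append, h5]
          by_cases hyx : y = x
          · subst hyx
            have h0 : List.count y runs = 0 := List.count_eq_zero.mpr hmem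
            simp [h0]
          · have : List.count y [x] = 0 := by
              simp [List.count_eq_zero]; exact hyx
            simp [this]

-- ===== VERDICT (by name: the statement is the Claim_ definition above) =====
theorem solution_spec : Claim_equal_solution := by
  intro s _
  unfold Spec_solution solution solution_alt
  obtain ⟨h1, h2, h3, h4, h5⟩ := inv_holds s.toList
  set st := s.toList.foldl solutionStep (PySem.Set.empty, none, PySem.Set.empty) with hst
  set runs := s.toList.foldl runStep [] with hruns
  have hcounter : runs.foldl (fun d ch => d.insert ch (d.getD ch 0 + 1))
      (PySem.Dict.empty : PySem.Dict Char Int) = PySem.Dict.counter runs :=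
    PySem.Dict.foldl_insert_getD_add_one_eq_counter runs
  have hchars : (((PySem.Dict.counter runs).items.filter (fun p => 2 ≤ p.2)).map (·.1)) =
      (PySem.Set.ofList runs).filter (fun k => decide ((2:Int) ≤ (runs.count k : Int))) := by
    rw [PySem.Dict.items_counter, List.filter_map, List.map_map]
    simp [Function.comp_def]
  have hperm : st.1.Perm
      ((PySem.Set.ofList runs).filter (fun k => decide ((2:Int) ≤ (runs.count k : Int)))) := by
    rw [List.perm_ext_iff_of_nodup h4 ((PySem.Set.nodup_ofList runs).filter _)]
    intro a
    rw [h5, List.mem_filter]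
    constructor
    · intro h
      refine ⟨(PySem.Set.mem_ofList runs a).mpr (List.one_le_count_iff.mp (by omega)), by
        simp; exact_mod_cast h⟩
    · intro ⟨_, h⟩
      simp at h; exact_mod_cast h
  have hsort : PySem.List.sorted st.1 (fun x => x) false =
      PySem.List.sorted
        ((PySem.Set.ofList runs).filter (fun k => decide ((2:Int) ≤ (runs.count k : Int))))
        (fun x => x) false :=
    (PySem.List.sorted_id_eq_sorted_id_iff_perm _ _).mpr hperm
  simp only [hcounter, hchars, ← hsort]
  by_cases hnil : st.1 = []
  · simp [hnil, PySem.List.sorted_eq_nil_iff]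
  · have hne : PySem.List.sorted st.1 (fun x => x) false ≠ [] := by
      rw [Ne, PySem.List.sorted_eq_nil_iff]; exact hnil
    simp [hnil, hne]
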